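-- pv_equiv track=rewrite | github.com/ssilwal29/chunkhound | providers/parsing/text_parser.py | _split_yaml_sections
-- ===== SOURCE A (Python) =====
-- from typing import List, Dict, Any, Optional
--
-- def _split_yaml_sections(content: str) -> List[str]:
--     """Split YAML content into logical sections based on top-level keys."""
--     sections = []
--     current_section = []
--     indent_level = 0
--
--     for line in content.split('\n'):
--         # Detect top-level keys (no indentation, ends with colon)
--         if line and not line.startswith(' ') and not line.startswith('\t') and ':' in line:
--             # Save previous section
--             if current_section:
--                 sections.append('\n'.join(current_section))
--                 current_section = []
--
--         current_section.append(line)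
--
--     # Add final section
--     if current_section:
--         sections.append('\n'.join(current_section))
--
--     return sections
-- ===== SOURCE B (Python) =====
-- from typing import List
--
--
-- def _split_yaml_sections(content: str) -> List[str]:
--     """Split YAML content into logical sections based on top-level keys.
--
--     Boundary-scan decomposition: walk an index over the split lines; for each
--     section start, scan forward to the next top-level key (or the end) and
--     emit the joined slice; no accumulator list or final flush is needed.
--     """
--     def _is_top_key(line: str) -> bool:
--         return bool(line) and line[0] not in ' \t' and ':' in line
--
--     lines = content.split('\n')
--     n = len(lines)
--     sections = []
--     start = 0
--     while start < n:
--         end = start + 1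
--         while end < n and not _is_top_key(lines[end]):
--             end += 1
--         sections.append('\n'.join(lines[start:end]))
--         start = end
--     return sections
-- ===== Notes on version B (the rewrite author's own statement) =====
-- stated objective: alternative
-- what changed: Replaces A's accumulate-and-flush fold (current_section list, conditional flush on each key line, final flush) by a boundary scan: an index walks the line list, finds the end of each section at the next top-level key, and emits the joined slice lines[start:end] directly.
import Mathlib
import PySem

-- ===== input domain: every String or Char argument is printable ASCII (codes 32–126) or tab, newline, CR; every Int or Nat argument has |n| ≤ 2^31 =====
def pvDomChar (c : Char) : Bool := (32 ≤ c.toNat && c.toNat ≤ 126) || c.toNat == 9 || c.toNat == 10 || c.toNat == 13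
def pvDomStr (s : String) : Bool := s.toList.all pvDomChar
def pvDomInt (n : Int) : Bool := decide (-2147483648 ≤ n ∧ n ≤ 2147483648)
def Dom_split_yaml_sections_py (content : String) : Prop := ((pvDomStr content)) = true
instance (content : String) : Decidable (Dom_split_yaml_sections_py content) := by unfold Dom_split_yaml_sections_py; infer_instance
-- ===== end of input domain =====

-- B replaces A's accumulate-and-flush fold by a boundary scan over line indices; same values, alternative structure.


-- ===== PORT A =====
-- 'line and not line.startswith(' ') and not line.startswith('\t') and ':' in line'
def pvIsTopKeyA (line : String) : Bool :=
  !(line == "") && !(PySem.Str.startswith line " ") && !(PySem.Str.startswith line "\t")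
    && PySem.Str.isIn ":" line

-- one iteration of A's for-loop over the state (sections, current_section)
def pvAStep (st : List String × List String) (line : String) : List String × List String :=
  let st' :=
    if pvIsTopKeyA line then
      if !st.2.isEmpty then (st.1 ++ [PySem.Str.join "\n" st.2], ([] : List String)) else st
    else st
  (st'.1, st'.2 ++ [line])

def split_yaml_sections_py (content : String) : List String :=
  let lines := (PySem.Str.split? content "\n").getD []
  let st := lines.foldl pvAStep (([] : List String), ([] : List String))
  if !st.2.isEmpty then st.1 ++ [PySem.Str.join "\n" st.2] else st.1

-- ===== PORT B =====
-- 'bool(line) and line[0] not in ' \t' and ':' in line'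
def pvIsTopKeyB (line : String) : Bool :=
  !(line == "") &&
    (match PySem.Str.pyGet? line 0 with
     | some c => !(PySem.Str.isIn (String.ofList [c]) " \t")
     | none => false) &&
    PySem.Str.isIn ":" line

-- inner while: advance end while it is in range and lines[end] is not a top-level key
-- (the guard e < n keeps the lookup in range, so getD matches Python's lines[end])
def pvScanB (lines : List String) (n : Nat) (e : Nat) : Nat :=
  if e < n ∧ ¬ (pvIsTopKeyB (lines.getD e "") = true) then pvScanB lines n (e + 1) else e
termination_by n - e
decreasing_by omega

theorem pvScanB_le (lines : List String) (n e : Nat) : e ≤ pvScanB lines n e := by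
  fun_induction pvScanB with
  | case1 _ _ ih => omega
  | case2 => omega

-- outer while: emit the joined slice lines[start:end] and continue at end
def pvOuterB (lines : List String) (n : Nat) (sections : List String) (start : Nat) :
    List String :=
  if h : start < n then
    let e := pvScanB lines n (start + 1)
    pvOuterB lines n
      (sections ++ [PySem.Str.join "\n"
        (PySem.List.slice lines (some (start : Int)) (some (e : Int)))]) e
  else sections
termination_by n - start
decreasing_by
  have := pvScanB_le lines n (start + 1)
  omega

def split_yaml_sections_py_alt (content : String) : List String :=
  let lines := (PySem.Str.split? content "\n").getD []
  pvOuterB lines lines.length [] 0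

-- ===== PRECONDITION & SPEC =====
def Spec_split_yaml_sections_py (content : String) (out : List String) : Prop := out = split_yaml_sections_py_alt content
instance (content : String) (out : List String) : Decidable (Spec_split_yaml_sections_py content out) := by unfold Spec_split_yaml_sections_py; infer_instance

-- ===== CLAIM (what is proved, stated in full; the proofs are below) =====
def Claim_equal_split_yaml_sections_py : Prop := ∀ (content : String), Dom_split_yaml_sections_py content → Spec_split_yaml_sections_py content (split_yaml_sections_py content)

-- ===== LEMMAS AND PROOFS =====

theorem pv_singleton_infix {α : Type} (a : α) (l : List α) : [a] <:+: l ↔ a ∈ l := by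
  constructor
  · intro h
    exact List.singleton_sublist.mp h.sublist
  · intro h
    obtain ⟨s, t, rfl⟩ := List.mem_iff_append.mp h
    exact ⟨s, t, by simp⟩

theorem pv_isIn_char (c : Char) :
    PySem.Str.isIn (String.ofList [c]) " \t" = (c == ' ' || c == '\t') := by
  rw [Bool.eq_iff_iff, PySem.Str.isIn_iff_infix]
  simp [pv_singleton_infix, show (" \t").toList = [' ', '\t'] from by decide]

-- the two ports' top-level-key tests agree
theorem pvKeyAB (line : String) : pvIsTopKeyA line = pvIsTopKeyB line := by
  unfold pvIsTopKeyA pvIsTopKeyB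
  by_cases he : line = ""
  · subst he; decide
  · have hne : (line == "") = false := by simp [he]
    obtain ⟨c, cs, hl⟩ : ∃ c cs, line.toList = c :: cs := by
      cases h : line.toList with
      | nil => exact absurd (String.toList_eq_nil_iff.mp h) he
      | cons c cs => exact ⟨c, cs, rfl⟩
    have h0 : PySem.Str.pyGet? line 0 = some c := by simp [hl]
    have h1 : PySem.Str.startswith line " " = (c == ' ') := by
      rw [PySem.Str.startswith_eq, hl, show (" ").toList = [' '] from by decide]
      simp [PySem.Chars.startswith, List.isPrefixOf, eq_comm]
    have h2 : PySem.Str.startswith line "\t" = (c == '\t') := by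
      rw [PySem.Str.startswith_eq, hl, show ("\t").toList = ['\t'] from by decide]
      simp [PySem.Chars.startswith, List.isPrefixOf, eq_comm]
    have h3 : PySem.Chars.isIn [c] [' ', '\t'] = (c == ' ' || c == '\t') := by
      have := pv_isIn_char c
      simpa using this
    rw [hne, h0, h1, h2]
    simp [h3, Bool.and_assoc]

theorem pv_take_len_takeWhile {α : Type} (p : α → Bool) (l : List α) :
    l.take ((l.takeWhile p).length) = l.takeWhile p := by
  induction l with
  | nil => rfl
  | cons x xs ih =>
      by_cases hp : p x = true
      · simp [hp, ih]
      · simp [hp]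

theorem pv_drop_len_takeWhile {α : Type} (p : α → Bool) (l : List α) :
    l.drop ((l.takeWhile p).length) = l.dropWhile p := by
  induction l with
  | nil => rfl
  | cons x xs ih =>
      by_cases hp : p x = true
      · simp [hp, ih]
      · simp [hp]

-- common recursive specification: one section = head line plus following non-key lines
def pvSec (h : String) (rest : List String) : List String :=
  match hrem : rest.dropWhile (fun l => !pvIsTopKeyB l) with
  | [] => [PySem.Str.join "\n" (h :: rest)]
  | k :: t =>
      PySem.Str.join "\n" (h :: rest.takeWhile (fun l => !pvIsTopKeyB l)) :: pvSec k t
termination_by rest.length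
decreasing_by
  have hle := List.length_dropWhile_le (p := fun l => !pvIsTopKeyB l) (l := rest)
  rw [hrem] at hle
  simp at hle
  omega

theorem pvSec_nil (h : String) (rest : List String)
    (hd : rest.dropWhile (fun l => !pvIsTopKeyB l) = []) :
    pvSec h rest = [PySem.Str.join "\n" (h :: rest)] := by
  rw [pvSec]
  split
  · rfl
  · rename_i k t heq; rw [hd] at heq; cases heq

theorem pvSec_cons (h : String) (rest : List String) (k : String) (t : List String)
    (hd : rest.dropWhile (fun l => !pvIsTopKeyB l) = k :: t) :
    pvSec h rest =
      PySem.Str.join "\n" (h :: rest.takeWhile (fun l => !pvIsTopKeyB l)) :: pvSec k t := by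
  rw [pvSec]
  split
  · rename_i heq; rw [hd] at heq; cases heq
  · rename_i k' t' heq
    rw [hd] at heq
    cases heq
    rfl

-- pvSec with a prefix of already-collected lines in the open section
def pvSecP (h : String) (pre rest : List String) : List String :=
  match rest.dropWhile (fun l => !pvIsTopKeyB l) with
  | [] => [PySem.Str.join "\n" (h :: (pre ++ rest))]
  | k :: t =>
      PySem.Str.join "\n" (h :: (pre ++ rest.takeWhile (fun l => !pvIsTopKeyB l))) :: pvSec k t

theorem pvSecP_nil_pre (h : String) (rest : List String) : pvSecP h [] rest = pvSec h rest := by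
  unfold pvSecP
  cases hd : rest.dropWhile (fun l => !pvIsTopKeyB l) with
  | nil => rw [pvSec_nil h rest hd]; simp
  | cons k t => rw [pvSec_cons h rest k t hd]; simp

-- A's fold (with final flush) computes pvSecP
theorem pvA_eq_sec (rest : List String) : ∀ (sections pre : List String) (h : String),
    (let st := rest.foldl pvAStep (sections, h :: pre)
     if !st.2.isEmpty then st.1 ++ [PySem.Str.join "\n" st.2] else st.1) =
    sections ++ pvSecP h pre rest := by
  induction rest with
  | nil =>
      intro sections pre h
      simp [pvSecP]
  | cons l ls ih =>
      intro sections pre h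
      simp only [List.foldl_cons]
      by_cases hk : pvIsTopKeyB l = true
      · have hka : pvIsTopKeyA l = true := by rw [pvKeyAB]; exact hk
        have hstep : pvAStep (sections, h :: pre) l =
            (sections ++ [PySem.Str.join "\n" (h :: pre)], [l]) := by
          simp [pvAStep, hka]
        rw [hstep, ih]
        rw [pvSecP_nil_pre]
        unfold pvSecP
        rw [show (l :: ls).dropWhile (fun l => !pvIsTopKeyB l) = l :: ls from by simp [hk],
            show (l :: ls).takeWhile (fun l => !pvIsTopKeyB l) = [] from by simp [hk]]
        simp
      · have hka : pvIsTopKeyA l = false := by rw [pvKeyAB]; simp [hk]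
        have hstep : pvAStep (sections, h :: pre) l = (sections, h :: (pre ++ [l])) := by
          simp [pvAStep, hka]
        rw [hstep, ih]
        unfold pvSecP
        rw [show (l :: ls).dropWhile (fun l => !pvIsTopKeyB l) = ls.dropWhile (fun l => !pvIsTopKeyB l) from by simp [hk],
            show (l :: ls).takeWhile (fun l => !pvIsTopKeyB l) = l :: ls.takeWhile (fun l => !pvIsTopKeyB l) from by simp [hk]]
        cases hd : ls.dropWhile (fun l => !pvIsTopKeyB l) with
        | nil => simp
        | cons k t => simp

-- the inner while finds the end of the current non-key run
theorem pvScanB_eq (lines : List String) (e : Nat) :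
    pvScanB lines lines.length e =
      e + ((lines.drop e).takeWhile (fun l => !pvIsTopKeyB l)).length := by
  fun_induction pvScanB lines lines.length e with
  | case1 e h ih =>
      obtain ⟨hlt, hnk⟩ := h
      have hget : lines.getD e "" = lines[e] := List.getD_eq_getElem lines "" hlt
      rw [List.drop_eq_getElem_cons hlt, List.takeWhile_cons]
      rw [hget] at hnk
      simp only [Bool.not_eq_true] at hnk
      simp [hnk, ih]
      omega
  | case2 e h =>
      rw [Classical.not_and_iff_not_or_not] at h
      rcases h with h | h
      · have : lines.length ≤ e := by omega
        rw [List.drop_eq_nil_of_le this]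
        simp
      · by_cases hlt : e < lines.length
        · have hget : lines.getD e "" = lines[e] := List.getD_eq_getElem lines "" hlt
          rw [hget] at h
          simp only [not_not] at h
          rw [List.drop_eq_getElem_cons hlt, List.takeWhile_cons]
          simp [h]
        · rw [List.drop_eq_nil_of_le (by omega)]
          simp

-- B's outer loop computes pvSec
theorem pvB_eq_sec (lines : List String) : ∀ (N : Nat) (rest : List String), rest.length < N →
    ∀ (start : Nat) (sections : List String) (h : String),
    lines.drop start = h :: rest →
    pvOuterB lines lines.length sections start = sections ++ pvSec h rest := by
  intro N
  induction N with
  | zero =>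
      intro rest hlen
      omega
  | succ N ih =>
      intro rest hlen start sections h hdrop
      have hstart : start < lines.length := by
        by_contra hge
        rw [List.drop_eq_nil_of_le (by omega)] at hdrop
        cases hdrop
      have hrest : lines.drop (start + 1) = rest := by
        have h1 : lines.drop (start + 1) = (lines.drop start).drop 1 := by
          rw [List.drop_drop]
        rw [h1, hdrop]
        rfl
      have he : pvScanB lines lines.length (start + 1) =
          start + 1 + (rest.takeWhile (fun l => !pvIsTopKeyB l)).length := by
        rw [pvScanB_eq, hrest]
      have hslice : PySem.List.slice lines (some (start : Int))
            (some ((pvScanB lines lines.length (start + 1) : Nat) : Int)) =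
          h :: rest.takeWhile (fun l => !pvIsTopKeyB l) := by
        rw [PySem.List.slice_toNat (ha := Int.natCast_nonneg _) (hb := Int.natCast_nonneg _), he]
        simp only [Int.toNat_natCast]
        rw [hdrop]
        have : start + 1 + (rest.takeWhile (fun l => !pvIsTopKeyB l)).length - start
            = (rest.takeWhile (fun l => !pvIsTopKeyB l)).length + 1 := by omega
        rw [this, List.take_succ_cons, pv_take_len_takeWhile]
      have hdropE : lines.drop (pvScanB lines lines.length (start + 1)) =
          rest.dropWhile (fun l => !pvIsTopKeyB l) := by
        have h2 : (lines.drop (start + 1)).drop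
              ((rest.takeWhile (fun l => !pvIsTopKeyB l)).length) =
            lines.drop (start + 1 + (rest.takeWhile (fun l => !pvIsTopKeyB l)).length) := by
          rw [List.drop_drop]
        rw [he, ← h2, hrest, pv_drop_len_takeWhile]
      rw [pvOuterB, dif_pos hstart]
      simp only []
      rw [hslice]
      cases hd : rest.dropWhile (fun l => !pvIsTopKeyB l) with
      | nil =>
          have hend : lines.length ≤ pvScanB lines lines.length (start + 1) := by
            by_contra hlt
            have := List.drop_eq_nil_iff.mp (hdropE.trans hd)
            omega
          rw [pvOuterB, dif_neg (by omega)]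
          have htake : rest.takeWhile (fun l => !pvIsTopKeyB l) = rest := by
            have := pv_take_len_takeWhile (fun l => !pvIsTopKeyB l) rest
            have hlen2 : (rest.takeWhile (fun l => !pvIsTopKeyB l)).length = rest.length := by
              have hle := (List.takeWhile_prefix (p := fun l => !pvIsTopKeyB l) (l := rest)).length_le
              have := pv_drop_len_takeWhile (fun l => !pvIsTopKeyB l) rest
              rw [hd] at this
              have := List.drop_eq_nil_iff.mp this
              omega
            rw [hlen2, List.take_length] at this
            exact this.symm
          rw [htake, pvSec_nil h rest hd]
      | cons k t =>
          have hlt : pvScanB lines lines.length (start + 1) < lines.length := by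
            by_contra hge
            rw [List.drop_eq_nil_of_le (by omega)] at hdropE
            rw [hd] at hdropE
            cases hdropE
          have htlen : t.length < N := by
            have hle := List.length_dropWhile_le (p := fun l => !pvIsTopKeyB l) (l := rest)
            rw [hd] at hle
            simp at hle
            omega
          rw [ih t htlen _ _ k (hdropE.trans hd)]
          rw [pvSec_cons h rest k t hd]
          simp

-- ===== VERDICT (by name: the statement is the Claim_ definition above) =====
theorem split_yaml_sections_py_spec : Claim_equal_split_yaml_sections_py := by
  intro content _
  unfold Spec_split_yaml_sections_py split_yaml_sections_py split_yaml_sections_py_alt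
  cases hl : ((PySem.Str.split? content "\n").getD []) with
  | nil => simp [pvOuterB]
  | cons l0 ls =>
      have hstep : pvAStep (([] : List String), ([] : List String)) l0 = ([], [l0]) := by
        unfold pvAStep
        split <;> simp
      have hA := pvA_eq_sec ls [] [] l0
      have hB := pvB_eq_sec (l0 :: ls) (ls.length + 1) ls (by omega) 0 [] l0 (by simp)
      simp only [List.foldl_cons, hstep] at *
      rw [hB, hA, pvSecP_nil_pre]
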